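-- pv_equiv track=rewrite | github.com/hannydarris/githubTest | Code/alphacode.py | alphapinEncode
-- ===== SOURCE A (Python) =====
-- def alphapinEncode(pin):
-- 	"""(int) -> str
--
--         This function will take an integer (pin), and will return
--         a string representation of those numbers (phonic). The
--         function will run while the pin is greater than 0, and
--         the last two digits of the pin will be removed with each
--         iteration until the pin runs out of digits. Within each
--         iteration, the two digits removed will first be converted
--         to a corresponding vowel and consonant using indeces, and
--         that combination of two letters will be added to the beginning
--         of phonic. After all iterations have run, phonic will be
--         returned.
--
--         >>> alphapinEncode(4327)
--         'lohi'
--         >>> alphapinEncode(1298)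
--         'dizo'
-- 	"""
-- 	vowels = "aeiou"
-- 	consonants = "bcdfghjklmnpqrstvwyz"
-- 	phonic = ""
-- 	while pin > 0:
-- 		tens = pin%100
-- 		vIndex = tens%5
-- 		cIndex = tens//5
-- 		sound = consonants[cIndex] + vowels[vIndex]
-- 		phonic = sound + phonic
-- 		pin = pin//100
-- 	return phonic
-- ===== SOURCE B (Python) =====
-- def alphapinEncode(pin):
-- 	vowels = "aeiou"
-- 	consonants = "bcdfghjklmnpqrstvwyz"
-- 	if pin <= 0:
-- 		return ''
-- 	s = str(pin)
-- 	if len(s) % 2 == 1: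
-- 		s = '0' + s
--
-- 	def pairSounds(t):
-- 		if t == '':
-- 			return ''
-- 		two = (ord(t[0]) - 48) * 10 + (ord(t[1]) - 48)
-- 		return consonants[two // 5] + vowels[two % 5] + pairSounds(t[2:])
--
-- 	return pairSounds(s)
-- ===== Notes on version B (the rewrite author's own statement) =====
-- stated objective: alternative
-- what changed: Replaces A's low-to-high arithmetic loop (pin%100, pin//=100, prepend to the accumulator) with a high-to-low scan: convert the pin once to its zero-padded decimal string and recurse over it two characters at a time, appending each consonant-vowel pair in output order.
import Mathlib
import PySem

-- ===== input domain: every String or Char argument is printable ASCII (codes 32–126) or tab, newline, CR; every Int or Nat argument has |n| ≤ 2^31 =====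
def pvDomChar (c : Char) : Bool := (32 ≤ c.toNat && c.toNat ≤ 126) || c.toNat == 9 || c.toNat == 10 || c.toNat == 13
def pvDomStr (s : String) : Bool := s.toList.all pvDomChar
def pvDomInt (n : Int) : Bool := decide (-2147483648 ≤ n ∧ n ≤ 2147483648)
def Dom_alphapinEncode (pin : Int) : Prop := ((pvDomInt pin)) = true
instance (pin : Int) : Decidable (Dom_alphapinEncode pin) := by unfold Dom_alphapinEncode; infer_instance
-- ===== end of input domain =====

-- B re-implements A's low-to-high division loop as a left-to-right two-character scan of str(pin); same return value, no speed claim.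

-- ===== PORT A =====
def pvVowels : List Char := ['a', 'e', 'i', 'o', 'u']
def pvConsonants : List Char :=
  ['b','c','d','f','g','h','j','k','l','m','n','p','q','r','s','t','v','w','y','z']

-- the 'while pin > 0' loop of A, state (pin, phonic); the indices are always in range (0 ≤ tens ≤ 99), so xs[i] is pyGetD
def alphapinGo (pin : Int) (phonic : List Char) : List Char :=
  if h : 0 < pin then
    let tens := PySem.Int.mod pin 100
    let vIndex := PySem.Int.mod tens 5
    let cIndex := PySem.Int.floordiv tens 5
    let sound := [PySem.List.pyGetD pvConsonants cIndex ' ', PySem.List.pyGetD pvVowels vIndex ' ']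
    alphapinGo (PySem.Int.floordiv pin 100) (sound ++ phonic)
  else phonic
termination_by pin.toNat
decreasing_by
  have h100 : (0:Int) < 100 := by norm_num
  rw [PySem.Int.floordiv_eq_ediv_of_pos h100]
  omega

def alphapinEncode (pin : Int) : String := String.mk (alphapinGo pin [])

-- ===== PORT B =====
-- the recursive helper pairSounds of Source B; the one-char case is unreachable (its input always has even length)
def pairSounds : List Char → List Char
  | a :: b :: rest =>
    let two : Int := ((a.toNat : Int) - 48) * 10 + ((b.toNat : Int) - 48)
    PySem.List.pyGetD pvConsonants (PySem.Int.floordiv two 5) ' ' ::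
      PySem.List.pyGetD pvVowels (PySem.Int.mod two 5) ' ' :: pairSounds rest
  | _ => []

def alphapinEncode_alt (pin : Int) : String :=
  if pin ≤ 0 then "" else
    let s := PySem.Int.toChars pin
    let s := if s.length % 2 = 1 then '0' :: s else s
    String.mk (pairSounds s)

-- ===== PRECONDITION & SPEC =====
def Spec_alphapinEncode (pin : Int) (out : String) : Prop := out = alphapinEncode_alt pin
instance (pin : Int) (out : String) : Decidable (Spec_alphapinEncode pin out) := by unfold Spec_alphapinEncode; infer_instance

-- ===== CLAIM (what is proved, stated in full; the proofs are below) =====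
def Claim_equal_alphapinEncode : Prop := ∀ (pin : Int), Dom_alphapinEncode pin → Spec_alphapinEncode pin (alphapinEncode pin)

-- ===== LEMMAS AND PROOFS =====

-- reference recursion: the consonant-vowel pairs of n's two-digit groups, high group first
def encN (n : Nat) : List Char :=
  if h : 0 < n then
    encN (n / 100) ++
      [pvConsonants.getD (n % 100 / 5) ' ', pvVowels.getD (n % 100 % 5) ' ']
  else []
termination_by n
decreasing_by omega

lemma alphapinGo_eq (n : Nat) : ∀ (ph : List Char), alphapinGo (n : Int) ph = encN n ++ ph := by
  induction n using Nat.strong_induction_on with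
  | _ n ih =>
    intro ph
    rw [alphapinGo, encN]
    by_cases h : 0 < n
    · have hc : (0:Int) < (n:Int) := by exact_mod_cast h
      simp only [hc, h, dif_pos]
      rw [show ((100:Int)) = ((100:Nat):Int) by norm_num, PySem.Int.mod_natCast,
        show ((5:Int)) = ((5:Nat):Int) by norm_num, PySem.Int.mod_natCast,
        PySem.Int.floordiv_natCast, PySem.Int.floordiv_natCast,
        PySem.List.pyGetD_natCast, PySem.List.pyGetD_natCast]
      rw [ih (n / 100) (by omega)]
      simp
    · have hc : ¬ (0:Int) < (n:Int) := by exact_mod_cast h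
      simp [h]

def pad (xs : List Char) : List Char := if xs.length % 2 = 1 then '0' :: xs else xs

lemma pad_length_even (xs : List Char) : (pad xs).length % 2 = 0 := by
  unfold pad
  by_cases hx : xs.length % 2 = 1
  · rw [if_pos hx]; simp only [List.length_cons]; omega
  · rw [if_neg hx]; omega

lemma pad_append_two (xs : List Char) (a b : Char) : pad (xs ++ [a, b]) = pad xs ++ [a, b] := by
  unfold pad
  have : (xs ++ [a, b]).length % 2 = xs.length % 2 := by
    simp only [List.length_append, List.length_cons, List.length_nil]; omega
  rw [this]
  split <;> simp

lemma pairSounds_append : ∀ (xs ys : List Char), xs.length % 2 = 0 →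
    pairSounds (xs ++ ys) = pairSounds xs ++ pairSounds ys
  | [], ys, _ => by simp [pairSounds]
  | [a], ys, h => by simp at h
  | a :: b :: rest, ys, h => by
    simp only [List.cons_append, pairSounds]
    rw [pairSounds_append rest ys (by simp at h ⊢; omega)]

lemma digitChar_toNat (d : Nat) (h : d < 10) : ((Nat.digitChar d).toNat : Int) - 48 = d := by
  interval_cases d <;> decide

lemma pairSounds_two (hi lo : Nat) (hhi : hi < 10) (hlo : lo < 10) :
    pairSounds [Nat.digitChar hi, Nat.digitChar lo] =
      [pvConsonants.getD ((hi * 10 + lo) / 5) ' ', pvVowels.getD ((hi * 10 + lo) % 5) ' '] := by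
  simp only [pairSounds]
  rw [digitChar_toNat hi hhi, digitChar_toNat lo hlo]
  have htwo : ((hi:Int)) * 10 + (lo:Int) = ((hi * 10 + lo : Nat) : Int) := by push_cast; ring
  rw [htwo,
    show ((5:Int)) = ((5:Nat):Int) by norm_num,
    PySem.Int.floordiv_natCast, PySem.Int.mod_natCast,
    PySem.List.pyGetD_natCast, PySem.List.pyGetD_natCast]

lemma toDigits_split (n : Nat) (h : 100 ≤ n) :
    Nat.toDigits 10 n = Nat.toDigits 10 (n / 100) ++
      [Nat.digitChar (n / 10 % 10), Nat.digitChar (n % 10)] := by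
  rw [Nat.toDigits_eq_if (n := n) (by norm_num), if_neg (by omega),
      Nat.toDigits_eq_if (n := n / 10) (by norm_num), if_neg (by omega)]
  rw [Nat.div_div_eq_div_mul]
  simp

lemma pairSounds_pad_toDigits (n : Nat) : 0 < n →
    pairSounds (pad (Nat.toDigits 10 n)) = encN n := by
  induction n using Nat.strong_induction_on with
  | _ n ih =>
    intro h
    rcases Nat.lt_or_ge n 100 with hlt | hge
    · -- one two-digit group: encN n = [pair of n]
      have henc : encN n = [pvConsonants.getD (n / 5) ' ', pvVowels.getD (n % 5) ' '] := by
        rw [encN, dif_pos h, encN, dif_neg (by omega)]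
        have : n % 100 = n := by omega
        rw [this]
        simp
      rcases Nat.lt_or_ge n 10 with h10 | h10
      · rw [Nat.toDigits_of_lt_base (by omega)]
        have : pad [Nat.digitChar n] = [Nat.digitChar 0, Nat.digitChar n] := by
          unfold pad; simp; decide
        rw [this, pairSounds_two 0 n (by omega) h10, henc]
        norm_num
      · rw [Nat.toDigits_eq_if (by norm_num), if_neg (by omega),
            Nat.toDigits_of_lt_base (by omega)]
        simp only [List.singleton_append]
        have : pad [Nat.digitChar (n / 10), Nat.digitChar (n % 10)] =
            [Nat.digitChar (n / 10), Nat.digitChar (n % 10)] := by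
          unfold pad; simp
        rw [this, pairSounds_two (n / 10) (n % 10) (by omega) (by omega), henc]
        have : n / 10 * 10 + n % 10 = n := by omega
        rw [this]
    · -- many groups: peel the last two digits off the string and off encN
      rw [toDigits_split n hge, pad_append_two,
        pairSounds_append _ _ (pad_length_even _),
        pairSounds_two (n / 10 % 10) (n % 10) (by omega) (by omega),
        ih (n / 100) (by omega) (by omega)]
      conv_rhs => rw [encN, dif_pos h]
      have : n / 10 % 10 * 10 + n % 10 = n % 100 := by omega
      rw [this]

-- ===== VERDICT (by name: the statement is the Claim_ definition above) =====
theorem alphapinEncode_spec : Claim_equal_alphapinEncode := by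
  intro pin _
  unfold Spec_alphapinEncode alphapinEncode alphapinEncode_alt
  by_cases h : pin ≤ 0
  · rw [alphapinGo, dif_neg (by omega)]
    simp [h]
    rfl
  · have hn : pin = ((pin.toNat : Nat) : Int) := by omega
    simp only [h, if_false]
    rw [hn, alphapinGo_eq]
    have htc : PySem.Int.toChars ((pin.toNat : Nat) : Int) = Nat.toDigits 10 pin.toNat := by
      rw [PySem.Int.toChars, if_neg (by omega), Int.toNat_natCast]
    rw [htc,
      show (if (Nat.toDigits 10 pin.toNat).length % 2 = 1
            then '0' :: Nat.toDigits 10 pin.toNat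
            else Nat.toDigits 10 pin.toNat) = pad (Nat.toDigits 10 pin.toNat) from rfl,
      pairSounds_pad_toDigits pin.toNat (by omega)]
    simp
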